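-- pv_equiv track=rewrite | github.com/mnschmit/unsupervised-graph-text-conversion | src/analysis/ie_eval.py | factseq2set
-- ===== SOURCE A (Python) =====
-- from typing import List, Tuple, FrozenSet
--
-- def generate_triple(fact_buffer: List[str], sep: str) -> Tuple[str, str, str]:
--     triple_buffers = ([], [], [])
--     curr_buffer = 0
--     for elem in fact_buffer:
--         if elem == sep:
--             curr_buffer += 1
--             if curr_buffer > 2:
--                 break
--         else:
--             triple_buffers[curr_buffer].append(elem)
--
--     return tuple(" ".join(buf) for buf in triple_buffers)
--
-- def factseq2set(seq: List[str], eof="@EOF@", sep="@SEP@",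
--                 lower=True) -> FrozenSet[Tuple[str, str, str]]:
--     facts: List[Tuple[str, str, str]] = []
--     fact_buffer: List[str] = []
--     for token in seq:
--         if token == eof:
--             facts.append(generate_triple(fact_buffer, sep))
--             fact_buffer.clear()
--         else:
--             fact_buffer.append(
--                 token.lower() if lower and token != sep else token)
--
--     if fact_buffer:
--         facts.append(generate_triple(fact_buffer, sep))
--
--     return frozenset(facts)
-- ===== SOURCE B (Python) =====
-- def split_on(xs, pred):
--     """Split xs into segments between pred-matching elements (matches removed).
--     Always returns at least one segment; interior empty segments are kept."""
--     groups = []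
--     while True:
--         i = next((k for k, x in enumerate(xs) if pred(x)), None)
--         if i is None:
--             groups.append(xs)
--             return groups
--         groups.append(xs[:i])
--         xs = xs[i + 1:]
--
--
-- def make_triple(tokens, sep):
--     segs = split_on(tokens, lambda t: t == sep)[:3]
--     segs = segs + [[]] * (3 - len(segs))
--     return (" ".join(segs[0]), " ".join(segs[1]), " ".join(segs[2]))
--
--
-- def factseq2set(seq, eof="@EOF@", sep="@SEP@", lower=True):
--     groups = split_on(seq, lambda t: t == eof)
--     if not groups[-1]:
--         groups.pop()
--     return frozenset(
--         make_triple([t.lower() if lower and t != sep else t for t in g], sep)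
--         for g in groups)
-- ===== Notes on version B (the rewrite author's own statement) =====
-- stated objective: alternative
-- what changed: A's single interleaved scan (buffer tokens, flush on eof, build each triple with a counter state machine that breaks after the third sep) is re-decomposed as a pipeline: find-index-based splitting of the sequence on eof, then per group lowercase, split on sep, keep the first three segments, pad and join.
import Mathlib
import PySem

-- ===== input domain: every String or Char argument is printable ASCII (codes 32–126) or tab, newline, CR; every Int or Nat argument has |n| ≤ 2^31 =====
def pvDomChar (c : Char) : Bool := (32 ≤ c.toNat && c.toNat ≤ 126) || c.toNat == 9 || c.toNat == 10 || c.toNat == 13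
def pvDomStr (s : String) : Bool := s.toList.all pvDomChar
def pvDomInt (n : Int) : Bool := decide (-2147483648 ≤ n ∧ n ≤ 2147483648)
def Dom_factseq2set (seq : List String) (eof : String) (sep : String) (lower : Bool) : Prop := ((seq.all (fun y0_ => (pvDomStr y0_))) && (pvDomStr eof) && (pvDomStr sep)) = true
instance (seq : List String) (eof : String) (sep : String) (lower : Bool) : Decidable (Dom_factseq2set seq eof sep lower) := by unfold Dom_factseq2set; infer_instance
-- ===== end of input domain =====

-- B re-decomposes A's interleaved buffer-and-flush scan as: split on eof, per group split
-- on sep / take 3 / pad / join (objective: alternative decomposition, same cost).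

-- ===== PORT A =====
-- the loop of generate_triple: counter-indexed buffers, break after the third sep
def gtLoop (sep : String) (fb : List String) (b0 b1 b2 : List String) (curr : Nat) :
    List String × List String × List String :=
  match fb with
  | [] => (b0, b1, b2)
  | e :: rest =>
    if e = sep then
      if curr + 1 > 2 then (b0, b1, b2)
      else gtLoop sep rest b0 b1 b2 (curr + 1)
    else
      match curr with
      | 0 => gtLoop sep rest (b0 ++ [e]) b1 b2 curr
      | 1 => gtLoop sep rest b0 (b1 ++ [e]) b2 curr
      | _ => gtLoop sep rest b0 b1 (b2 ++ [e]) curr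

def generate_triple (fact_buffer : List String) (sep : String) : String × String × String :=
  match gtLoop sep fact_buffer [] [] [] 0 with
  | (b0, b1, b2) => (PySem.Str.join " " b0, PySem.Str.join " " b1, PySem.Str.join " " b2)

-- the main loop of A: state (facts, fact_buffer)
def aLoop (eof sep : String) (lower : Bool) (seq : List String)
    (facts : List (String × String × String)) (buf : List String) :
    List (String × String × String) × List String :=
  match seq with
  | [] => (facts, buf)
  | token :: rest =>
    if token = eof then
      aLoop eof sep lower rest (facts ++ [generate_triple buf sep]) []
    else
      aLoop eof sep lower rest facts
        (buf ++ [if lower && (token != sep) then PySem.Str.lower token else token])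

def factseq2set (seq : List String) (eof : String) (sep : String) (lower : Bool) :
    List (String × String × String) :=
  PySem.Set.ofList
    (if (aLoop eof sep lower seq [] []).2 ≠ [] then
      (aLoop eof sep lower seq [] []).1 ++ [generate_triple (aLoop eof sep lower seq [] []).2 sep]
    else (aLoop eof sep lower seq [] []).1)

-- ===== PORT B =====
-- termination fact for splitGo, cited by decreasing_by
theorem pvFindIdx?_lt {p : String → Bool} {xs : List String} {i : Nat}
    (h : List.findIdx? p xs = some i) : i < xs.length := by
  obtain ⟨hlt, -⟩ := List.findIdx?_eq_some_iff_getElem.mp h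
  exact hlt

-- Source B split_on: repeatedly find the first matching index, cut there
def splitGo (p : String → Bool) (groups : List (List String)) (xs : List String) :
    List (List String) :=
  match h : List.findIdx? p xs with
  | none => groups ++ [xs]
  | some i => splitGo p (groups ++ [xs.take i]) (xs.drop (i + 1))
termination_by xs.length
decreasing_by
  have hlt := pvFindIdx?_lt h
  simp only [List.length_drop]
  omega

def split_on (xs : List String) (p : String → Bool) : List (List String) :=
  splitGo p [] xs

-- Source B's padding line 'segs + [[]] * (3 - len(segs))'
def pad3 (segs : List (List String)) : List (List String) :=
  segs ++ List.replicate (3 - segs.length) []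

-- Source B make_triple: first three sep-separated segments, padded to length 3
-- (after padding the list has length ≥ 3, so getD is exact for Python's segs[0]/[1]/[2])
def make_triple (tokens : List String) (sep : String) : String × String × String :=
  (PySem.Str.join " " ((pad3 ((split_on tokens (fun t => t == sep)).take 3)).getD 0 []),
   PySem.Str.join " " ((pad3 ((split_on tokens (fun t => t == sep)).take 3)).getD 1 []),
   PySem.Str.join " " ((pad3 ((split_on tokens (fun t => t == sep)).take 3)).getD 2 []))

-- 'groups = split_on(...)' then 'if not groups[-1]: groups.pop()' (groups is never empty)
def bGroups (seq : List String) (eof : String) : List (List String) :=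
  if (split_on seq (fun t => t == eof)).getLast? = some [] then
    (split_on seq (fun t => t == eof)).dropLast
  else split_on seq (fun t => t == eof)

def factseq2set_alt (seq : List String) (eof : String) (sep : String) (lower : Bool) :
    List (String × String × String) :=
  PySem.Set.ofList ((bGroups seq eof).map (fun g =>
    make_triple (g.map (fun t => if lower && (t != sep) then PySem.Str.lower t else t)) sep))

-- ===== PRECONDITION & SPEC =====
def Spec_factseq2set (seq : List String) (eof : String) (sep : String) (lower : Bool) (out : List (String × String × String)) : Prop := out = factseq2set_alt seq eof sep lower
instance (seq : List String) (eof : String) (sep : String) (lower : Bool) (out : List (String × String × String)) : Decidable (Spec_factseq2set seq eof sep lower out) := by unfold Spec_factseq2set; infer_instance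

-- ===== CLAIM (what is proved, stated in full; the proofs are below) =====
def Claim_equal_factseq2set : Prop := ∀ (seq : List String) (eof : String) (sep : String) (lower : Bool), Dom_factseq2set seq eof sep lower → Spec_factseq2set seq eof sep lower (factseq2set seq eof sep lower)

-- ===== LEMMAS AND PROOFS =====

-- reference splitter: the nice structural recursion both ports are related to
def splitP (p : String → Bool) : List String → List (List String)
  | [] => [[]]
  | x :: xs => if p x then [] :: splitP p xs else (splitP p xs).modifyHead (x :: ·)

theorem splitP_ne_nil (p : String → Bool) (xs : List String) : splitP p xs ≠ [] := by
  induction xs with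
  | nil => simp [splitP]
  | cons x xs ih =>
    simp only [splitP]
    split
    · simp
    · cases h : splitP p xs with
      | nil => exact absurd h ih
      | cons a t => simp [List.modifyHead]

theorem splitP_all_false (p : String → Bool) (xs : List String)
    (h : ∀ y ∈ xs, p y = false) : splitP p xs = [xs] := by
  induction xs with
  | nil => rfl
  | cons x xs ih =>
    have hx : p x = false := h x (by simp)
    have hrest := ih (fun y hy => h y (by simp [hy]))
    simp [splitP, hx, hrest, List.modifyHead]

theorem splitP_findIdx_some (p : String → Bool) :
    ∀ (xs : List String) (i : Nat), List.findIdx? p xs = some i →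
      splitP p xs = xs.take i :: splitP p (xs.drop (i + 1)) := by
  intro xs
  induction xs with
  | nil => intro i h; simp at h
  | cons x xs ih =>
    intro i h
    rw [List.findIdx?_cons] at h
    by_cases hx : p x = true
    · simp [hx] at h
      subst h
      simp [splitP, hx]
    · simp [hx] at h
      obtain ⟨j, hj, rfl⟩ := h
      have := ih j hj
      simp [splitP, hx, this, List.modifyHead]

theorem splitGo_eq (p : String → Bool) :
    ∀ (n : Nat) (xs : List String), xs.length ≤ n → ∀ (out : List (List String)),
      splitGo p out xs = out ++ splitP p xs := by
  intro n
  induction n with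
  | zero =>
    intro xs hlen out
    have : xs = [] := List.eq_nil_of_length_eq_zero (Nat.le_zero.mp hlen)
    subst this
    rw [splitGo]
    simp [splitP]
  | succ n ih =>
    intro xs hlen out
    rw [splitGo.eq_def]
    split
    · rename_i h
      have : ∀ y ∈ xs, p y = false := List.findIdx?_eq_none_iff.mp h
      rw [splitP_all_false p xs this]
    · rename_i i h
      have hlt := pvFindIdx?_lt h
      have hrec := ih (xs.drop (i + 1)) (by simp [List.length_drop]; omega)
        (out ++ [xs.take i])
      rw [hrec, splitP_findIdx_some p xs i h]
      simp

theorem split_on_eq (xs : List String) (p : String → Bool) :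
    split_on xs p = splitP p xs := by
  unfold split_on
  exact splitGo_eq p xs.length xs (le_refl _) []

-- getD through modifyHead
theorem getD_modifyHead_zero {α : Type} (l : List α) (f : α → α) (d : α) (hne : l ≠ []) :
    (l.modifyHead f).getD 0 d = f (l.getD 0 d) := by
  cases l with
  | nil => exact absurd rfl hne
  | cons a t => rfl

theorem getD_modifyHead_succ {α : Type} (l : List α) (f : α → α) (n : Nat) (d : α) :
    (l.modifyHead f).getD (n + 1) d = l.getD (n + 1) d := by
  cases l with
  | nil => rfl
  | cons a t => rfl

-- gtLoop characterised by splitP, stage by stage (curr = 2, 1, 0)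
theorem gtLoop_two (sep : String) :
    ∀ (fb b0 b1 b2 : List String),
      gtLoop sep fb b0 b1 b2 2 =
        (b0, b1, b2 ++ (splitP (fun t => t == sep) fb).getD 0 []) := by
  intro fb
  induction fb with
  | nil => intro b0 b1 b2; simp [gtLoop, splitP]
  | cons e rest ih =>
    intro b0 b1 b2
    by_cases he : e = sep
    · simp [gtLoop, he, splitP]
    · have hbe : (e == sep) = false := by simp [he]
      have hs : splitP (fun t => t == sep) (e :: rest) =
          (splitP (fun t => t == sep) rest).modifyHead (e :: ·) := by
        simp [splitP, hbe]
      simp only [gtLoop, if_neg he, ih, hs]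
      rw [getD_modifyHead_zero _ _ _ (splitP_ne_nil _ _)]
      simp

theorem gtLoop_one (sep : String) :
    ∀ (fb b0 b1 b2 : List String),
      gtLoop sep fb b0 b1 b2 1 =
        (b0, b1 ++ (splitP (fun t => t == sep) fb).getD 0 [],
          b2 ++ (splitP (fun t => t == sep) fb).getD 1 []) := by
  intro fb
  induction fb with
  | nil => intro b0 b1 b2; simp [gtLoop, splitP]
  | cons e rest ih =>
    intro b0 b1 b2
    by_cases he : e = sep
    · simp only [gtLoop, if_pos he]
      norm_num
      rw [gtLoop_two]
      simp [splitP, he]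
    · have hbe : (e == sep) = false := by simp [he]
      have hs : splitP (fun t => t == sep) (e :: rest) =
          (splitP (fun t => t == sep) rest).modifyHead (e :: ·) := by
        simp [splitP, hbe]
      simp only [gtLoop, if_neg he, ih, hs]
      rw [getD_modifyHead_zero _ _ _ (splitP_ne_nil _ _), getD_modifyHead_succ]
      simp

theorem gtLoop_zero (sep : String) :
    ∀ (fb b0 b1 b2 : List String),
      gtLoop sep fb b0 b1 b2 0 =
        (b0 ++ (splitP (fun t => t == sep) fb).getD 0 [],
          b1 ++ (splitP (fun t => t == sep) fb).getD 1 [],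
          b2 ++ (splitP (fun t => t == sep) fb).getD 2 []) := by
  intro fb
  induction fb with
  | nil => intro b0 b1 b2; simp [gtLoop, splitP]
  | cons e rest ih =>
    intro b0 b1 b2
    by_cases he : e = sep
    · simp only [gtLoop, if_pos he]
      norm_num
      rw [gtLoop_one]
      simp [splitP, he]
    · have hbe : (e == sep) = false := by simp [he]
      have hs : splitP (fun t => t == sep) (e :: rest) =
          (splitP (fun t => t == sep) rest).modifyHead (e :: ·) := by
        simp [splitP, hbe]
      simp only [gtLoop, if_neg he, ih, hs]
      rw [getD_modifyHead_zero _ _ _ (splitP_ne_nil _ _),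
        getD_modifyHead_succ, getD_modifyHead_succ]
      simp

-- getD through take-3-and-pad, for indices 0, 1, 2
theorem pad3_getD (l : List (List String)) (i : Nat) (hi : i < 3) :
    (pad3 (l.take 3)).getD i [] = l.getD i [] := by
  unfold pad3
  match l with
  | [] => interval_cases i <;> rfl
  | [a] => interval_cases i <;> rfl
  | [a, b] => interval_cases i <;> rfl
  | a :: b :: c :: t => interval_cases i <;> rfl

theorem make_triple_eq (tokens : List String) (sep : String) :
    make_triple tokens sep = generate_triple tokens sep := by
  unfold make_triple generate_triple
  rw [split_on_eq, gtLoop_zero]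
  rw [pad3_getD _ 0 (by omega), pad3_getD _ 1 (by omega), pad3_getD _ 2 (by omega)]
  simp

-- B's 'pop the trailing group iff empty'
def dropE (l : List (List String)) : List (List String) :=
  if l.getLast? = some [] then l.dropLast else l

theorem bGroups_eq (seq : List String) (eof : String) :
    bGroups seq eof = dropE (splitP (fun t => t == eof) seq) := by
  unfold bGroups dropE
  rw [split_on_eq]

theorem dropE_cons (g : List String) (l : List (List String)) (hl : l ≠ []) :
    dropE (g :: l) = g :: dropE l := by
  cases l with
  | nil => exact absurd rfl hl
  | cons b t =>
    unfold dropE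
    rw [List.getLast?_cons_cons]
    split <;> simp

theorem map_modifyHead_cons (proc : String → String) (x : String) (l : List (List String)) :
    ((l.modifyHead (x :: ·)).map (List.map proc)) =
      (l.map (List.map proc)).modifyHead (proc x :: ·) := by
  cases l <;> rfl

theorem modifyHead_append_cons (b : List String) (x : String) (l : List (List String)) :
    (l.modifyHead (x :: ·)).modifyHead (b ++ ·) = l.modifyHead ((b ++ [x]) ++ ·) := by
  cases l with
  | nil => rfl
  | cons a t => simp [List.modifyHead]

theorem modifyHead_nil_append (l : List (List String)) :
    l.modifyHead (([] : List String) ++ ·) = l := by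
  cases l <;> simp [List.modifyHead]

theorem dropE_map (proc : String → String) (l : List (List String)) :
    dropE (l.map (List.map proc)) = (dropE l).map (List.map proc) := by
  unfold dropE
  cases hl : l.getLast? with
  | none =>
    have : l = [] := by
      cases l with
      | nil => rfl
      | cons a t => simp [List.getLast?_cons] at hl
    subst this; rfl
  | some a =>
    rw [List.getLast?_map, hl]
    simp only [Option.map_some]
    by_cases ha : a = []
    · subst ha
      simp [List.map_dropLast]
    · have h1 : ¬ (List.map proc a = []) := by simp [ha]
      simp [ha, h1]

-- main loop invariant: A's scan+flush equals B's split-then-map pipeline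
theorem aLoop_eq (eof sep : String) (lower : Bool) :
    ∀ (seq : List String) (facts : List (String × String × String)) (buf : List String),
      (if (aLoop eof sep lower seq facts buf).2 ≠ [] then
        (aLoop eof sep lower seq facts buf).1 ++
          [generate_triple (aLoop eof sep lower seq facts buf).2 sep]
      else (aLoop eof sep lower seq facts buf).1) =
        facts ++ (dropE ((((splitP (fun t => t == eof) seq).map
            (List.map (fun t => if lower && (t != sep) then PySem.Str.lower t else t))).modifyHead
            (buf ++ ·)))).map (fun g => generate_triple g sep) := by
  intro seq
  induction seq with
  | nil =>
    intro facts buf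
    simp only [aLoop, splitP, List.map, List.modifyHead, dropE]
    by_cases hb : buf = []
    · subst hb; simp
    · simp [hb]
  | cons t rest ih =>
    intro facts buf
    by_cases ht : t = eof
    · have hbt : (t == eof) = true := by simp [ht]
      have hs : splitP (fun x => x == eof) (t :: rest) =
          [] :: splitP (fun x => x == eof) rest := by
        simp [splitP, hbt]
      have hne : (splitP (fun x => x == eof) rest).map
          (List.map (fun t => if lower && (t != sep) then PySem.Str.lower t else t)) ≠ [] := by
        simp [splitP_ne_nil]
      simp only [aLoop, if_pos ht, ih, hs, List.map_cons, List.map_nil,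
        List.modifyHead_cons, List.append_nil, modifyHead_nil_append]
      rw [dropE_cons _ _ hne]
      simp
    · have hbt : (t == eof) = false := by simp [ht]
      have hs : splitP (fun x => x == eof) (t :: rest) =
          (splitP (fun x => x == eof) rest).modifyHead (t :: ·) := by
        simp [splitP, hbt]
      simp only [aLoop, if_neg ht, ih, hs]
      rw [map_modifyHead_cons, modifyHead_append_cons]

-- ===== VERDICT (by name: the statement is the Claim_ definition above) =====
theorem factseq2set_spec : Claim_equal_factseq2set := by
  intro seq eof sep lower _
  unfold Spec_factseq2set factseq2set factseq2set_alt
  rw [aLoop_eq eof sep lower seq [] [], bGroups_eq, modifyHead_nil_append]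
  simp only [List.nil_append]
  rw [dropE_map]
  simp [List.map_map, make_triple_eq, Function.comp_def]
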